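-- pv_equiv track=rewrite | github.com/ooqitech/ATP | atp-auto-core-open/atp/engine/api_load_test.py | split_list_to_union_list
-- ===== SOURCE A (Python) =====
-- import copy
--
-- def split_list_to_union_list(num_list):
--     """
--     分割一个list，使之成为多个没有重复元素的列表
--     num_list: [1,2,3,4,5,3,4,2,3,3,1,7]
--     union_list : [[1,2,3,4,5], [3,4,2], [3], [3,1,7]]
--     """
--     union_list = []
--     part_list = []
--     for num in num_list:
--         if num not in part_list:
--             part_list.append(num)
--         else:
--             union_list.append(copy.copy(part_list))
--             part_list = [num]
--     if part_list:
--         union_list.append(copy.copy(part_list))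
--     return union_list
-- ===== SOURCE B (Python) =====
-- def split_list_to_union_list(num_list):
--     """
--     分割一个list，使之成为多个没有重复元素的列表
--     Recursive decomposition: peel off the longest duplicate-free prefix
--     (membership via a set), then recurse on the remainder.
--     """
--     if not num_list:
--         return []
--     head, rest = num_list[0], num_list[1:]
--     seen = {head}
--     group = [head]
--     k = 0
--     for x in rest:
--         if x in seen:
--             break
--         seen.add(x)
--         group.append(x)
--         k += 1
--     return [group] + split_list_to_union_list(rest[k:])
-- ===== Notes on version B (the rewrite author's own statement) =====
-- stated objective: alternative
-- what changed: Replaces A's single accumulator loop (growing part_list, flushing into union_list on a duplicate) by a recursive decomposition that peels off the longest duplicate-free prefix using a set and recurses on the remainder.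
import Mathlib
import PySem

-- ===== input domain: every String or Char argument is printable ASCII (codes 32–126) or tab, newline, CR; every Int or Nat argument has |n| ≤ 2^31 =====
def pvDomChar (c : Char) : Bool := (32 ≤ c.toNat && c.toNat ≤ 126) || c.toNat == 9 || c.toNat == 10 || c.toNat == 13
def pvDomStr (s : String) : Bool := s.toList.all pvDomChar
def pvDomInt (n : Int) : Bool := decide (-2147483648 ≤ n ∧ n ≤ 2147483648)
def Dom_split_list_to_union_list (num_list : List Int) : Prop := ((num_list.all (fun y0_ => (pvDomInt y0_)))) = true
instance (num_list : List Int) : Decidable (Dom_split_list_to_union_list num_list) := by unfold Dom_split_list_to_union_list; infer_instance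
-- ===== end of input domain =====

-- B replaces A's accumulator loop (flush-on-duplicate) by a recursive decomposition
-- peeling the longest duplicate-free prefix with a set; alternative structure, same values.


-- ===== PORT A =====
def split_list_to_union_list (num_list : List Int) : List (List Int) :=
  let st := num_list.foldl
    (fun (st : List (List Int) × List Int) num =>
      if num ∉ st.2 then (st.1, st.2 ++ [num])
      else (st.1 ++ [st.2], [num]))
    ([], [])
  if st.2 ≠ [] then st.1 ++ [st.2] else st.1

-- ===== PORT B =====
-- inner 'for x in rest: if x in seen: break …' loop: returns (collected prefix, remainder rest[k:])
def pvGrab (seen : PySem.Set Int) : List Int → List Int × List Int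
  | [] => ([], [])
  | x :: xs =>
    if PySem.Set.contains seen x then ([], x :: xs)
    else
      let pr := pvGrab (PySem.Set.add seen x) xs
      (x :: pr.1, pr.2)

theorem pvGrab_rest_le (seen : PySem.Set Int) (xs : List Int) :
    (pvGrab seen xs).2.length ≤ xs.length := by
  induction xs generalizing seen with
  | nil => simp [pvGrab]
  | cons x xs ih =>
    simp only [pvGrab]
    split
    · simp
    · exact le_trans (ih _) (Nat.le_succ _)

def split_list_to_union_list_alt : List Int → List (List Int)
  | [] => []
  | head :: rest =>
    let pr := pvGrab (PySem.Set.ofList [head]) rest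
    (head :: pr.1) :: split_list_to_union_list_alt pr.2
termination_by xs => xs.length
decreasing_by
  exact Nat.lt_succ_of_le (pvGrab_rest_le _ _)

-- ===== PRECONDITION & SPEC =====
def Spec_split_list_to_union_list (num_list : List Int) (out : List (List Int)) : Prop := out = split_list_to_union_list_alt num_list
instance (num_list : List Int) (out : List (List Int)) : Decidable (Spec_split_list_to_union_list num_list out) := by unfold Spec_split_list_to_union_list; infer_instance

-- ===== CLAIM (what is proved, stated in full; the proofs are below) =====
def Claim_equal_split_list_to_union_list : Prop := ∀ (num_list : List Int), Dom_split_list_to_union_list num_list → Spec_split_list_to_union_list num_list (split_list_to_union_list num_list)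

-- ===== LEMMAS AND PROOFS =====

theorem pvAlt_nil : split_list_to_union_list_alt [] = [] := by
  rw [split_list_to_union_list_alt.eq_def]

theorem pvAlt_cons (x : Int) (rest : List Int) :
    split_list_to_union_list_alt (x :: rest) =
      (x :: (pvGrab (PySem.Set.ofList [x]) rest).1) ::
        split_list_to_union_list_alt (pvGrab (PySem.Set.ofList [x]) rest).2 := by
  rw [split_list_to_union_list_alt.eq_def]

-- A's grouping as a structural recursion over the input with current part p
def pvS (p : List Int) : List Int → List (List Int)
  | [] => if p = [] then [] else [p]
  | x :: xs => if x ∉ p then pvS (p ++ [x]) xs else p :: pvS [x] xs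

theorem pvA_fold (xs : List Int) : ∀ (u : List (List Int)) (p : List Int),
    (let st := xs.foldl
      (fun (st : List (List Int) × List Int) num =>
        if num ∉ st.2 then (st.1, st.2 ++ [num])
        else (st.1 ++ [st.2], [num])) (u, p)
     if st.2 ≠ [] then st.1 ++ [st.2] else st.1) = u ++ pvS p xs := by
  induction xs with
  | nil =>
    intro u p
    simp only [List.foldl_nil, pvS]
    split_ifs with h h' <;> simp_all
  | cons x xs ih =>
    intro u p
    simp only [List.foldl_cons, pvS]
    by_cases hx : x ∉ p
    · simp only [if_pos hx]
      exact ih u (p ++ [x])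
    · simp only [if_neg hx]
      rw [ih (u ++ [p]) [x]]
      simp

theorem pvS_grab (xs : List Int) : ∀ (p : List Int) (s : PySem.Set Int),
    (∀ a, a ∈ s ↔ a ∈ p) → p ≠ [] →
    pvS p xs = (p ++ (pvGrab s xs).1) :: split_list_to_union_list_alt (pvGrab s xs).2 := by
  induction xs with
  | nil =>
    intro p s _ hp
    simp [pvS, pvGrab, hp, pvAlt_nil]
  | cons x xs ih =>
    intro p s hs hp
    by_cases hx : x ∈ p
    · have hc : PySem.Set.contains s x = true := by
        rw [PySem.Set.contains_iff]; exact (hs x).mpr hx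
      simp only [pvS, if_neg (not_not_intro hx), pvGrab, hc, if_pos]
      rw [pvAlt_cons]
      rw [ih [x] (PySem.Set.ofList [x]) (by intro a; simp [PySem.Set.mem_ofList]) (by simp)]
      simp
    · have hc : PySem.Set.contains s x = false := by
        by_contra h
        have : PySem.Set.contains s x = true := by
          cases hcc : PySem.Set.contains s x
          · exact absurd hcc h
          · rfl
        exact hx ((hs x).mp ((PySem.Set.contains_iff s x).mp this))
      simp only [pvS, if_pos hx, pvGrab, hc]
      rw [if_neg (by simp)]
      rw [ih (p ++ [x]) (PySem.Set.add s x) ?_ (by simp)]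
      · simp
      · intro a
        rw [PySem.Set.mem_add]
        simp [hs a]

theorem pvAB (xs : List Int) : split_list_to_union_list xs = split_list_to_union_list_alt xs := by
  have h := pvA_fold xs [] []
  simp only [List.nil_append] at h
  rw [split_list_to_union_list]
  rw [h]
  cases xs with
  | nil => simp [pvS, split_list_to_union_list_alt]
  | cons x rest =>
    simp only [pvS, List.not_mem_nil, not_false_iff, if_pos, List.nil_append]
    rw [pvS_grab rest [x] (PySem.Set.ofList [x]) (by intro a; simp [PySem.Set.mem_ofList]) (by simp)]
    rw [pvAlt_cons]
    simp

-- ===== VERDICT (by name: the statement is the Claim_ definition above) =====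
theorem split_list_to_union_list_spec : Claim_equal_split_list_to_union_list := by
  intro xs _
  unfold Spec_split_list_to_union_list
  exact pvAB xs
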